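-- pv_equiv track=rewrite | github.com/sparsetable/NYRCS_numbers | process.py | image_str
-- ===== SOURCE A (Python) =====
-- SHADES = "█▓▒░ "
--
-- def image_str(image: list, threshold = 50) -> None:
-- 	"""Converts the image array to a printable string"""
-- 	result = ""
-- 	for row in image:
-- 		for pixel in row:
-- 			if pixel > round(256 * (4/5)):
-- 				result += SHADES[0]*2
-- 			elif pixel > round(256 * (3/5)):
-- 				result += SHADES[1]*2
-- 			elif pixel > round(256 * (2/5)):
-- 				result += SHADES[2]*2
-- 			elif pixel > round(256 * (1/5)):
-- 				result += SHADES[3]*2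
-- 			else:
-- 				result += SHADES[4]*2
-- 		result += '\n'
-- 	return result
-- ===== SOURCE B (Python) =====
-- SHADES = "█▓▒░ "
--
-- def image_str(image: list, threshold = 50) -> None:
-- 	"""Converts the image array to a printable string"""
-- 	thresholds = [round(256 * k / 5) for k in range(1, 5)]  # [51, 102, 154, 205]
-- 	cache = {}  # memoise pixel value -> shade string
-- 	def shade(p):
-- 		s = cache.get(p)
-- 		if s is None:
-- 			# binary search: lo = number of thresholds strictly below p
-- 			lo, hi = 0, 4
-- 			while lo < hi:
-- 				mid = (lo + hi) // 2
-- 				if thresholds[mid] < p: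
-- 					lo = mid + 1
-- 				else:
-- 					hi = mid
-- 			s = SHADES[4 - lo] * 2
-- 			cache[p] = s
-- 		return s
-- 	lines = []
-- 	for row in image:
-- 		lines.append(''.join(map(shade, row)) + '\n')
-- 	return ''.join(lines)
-- ===== Notes on version B (the rewrite author's own statement) =====
-- stated objective: faster
-- what changed: Replaced the if/elif shade cascade with a binary search over an ascending threshold table plus a per-pixel-value memo dictionary, assembling the output as a per-row list joined once instead of repeated string concatenation.
import Mathlib
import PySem

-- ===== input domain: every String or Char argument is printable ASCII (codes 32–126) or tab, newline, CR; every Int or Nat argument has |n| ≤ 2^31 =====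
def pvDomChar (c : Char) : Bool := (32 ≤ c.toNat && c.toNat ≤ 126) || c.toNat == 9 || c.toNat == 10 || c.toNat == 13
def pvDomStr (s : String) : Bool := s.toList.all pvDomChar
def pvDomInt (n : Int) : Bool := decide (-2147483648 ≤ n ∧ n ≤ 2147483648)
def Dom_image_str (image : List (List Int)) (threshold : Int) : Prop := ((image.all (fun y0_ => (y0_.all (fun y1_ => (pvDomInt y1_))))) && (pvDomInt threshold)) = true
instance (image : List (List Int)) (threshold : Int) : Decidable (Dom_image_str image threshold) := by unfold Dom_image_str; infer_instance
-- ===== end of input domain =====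

-- B replaces A's if/elif shade cascade with a binary search over an ascending threshold
-- table plus a per-pixel-value memo dictionary, joining per-row strings once (alternative).


-- ===== PORT A =====
-- the round(256*k/5) literals evaluate to 205, 154, 102, 51
def pvShadeA (res : String) (pixel : Int) : String :=
  if pixel > 205 then res ++ "██"
  else if pixel > 154 then res ++ "▓▓"
  else if pixel > 102 then res ++ "▒▒"
  else if pixel > 51 then res ++ "░░"
  else res ++ "  "

def image_str (image : List (List Int)) (threshold : Int) : String :=
  image.foldl (fun result row => (row.foldl pvShadeA result) ++ "\n") ""

-- ===== PORT B =====
-- thresholds = [round(256*k/5) for k in range(1,5)]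
def pvThresholdsB : List Int := [51, 102, 154, 205]

-- the hand-written bisect_left while-loop; lo, hi stay in 0..4 so Nat arithmetic is exact
def pvBis (p : Int) (lo hi : Nat) : Nat :=
  if _h : lo < hi then
    let mid := (lo + hi) / 2
    if pvThresholdsB.getD mid 0 < p then pvBis p (mid + 1) hi else pvBis p lo mid
  else lo
termination_by hi - lo
decreasing_by all_goals omega

-- shade(p): memo lookup, else binary search and record in the cache
def pvShadeB (cache : PySem.Dict Int String) (p : Int) : String × PySem.Dict Int String :=
  match cache.get? p with
  | some s => (s, cache)
  | none =>
      let c := "█▓▒░ ".toList.getD (4 - pvBis p 0 4) ' '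
      let s := String.ofList [c, c]
      (s, cache.insert p s)

-- ''.join(map(shade, row)), threading the cache
def pvRowB (row : List Int) (cache : PySem.Dict Int String) : String × PySem.Dict Int String :=
  row.foldl (fun st p =>
    let r := pvShadeB st.2 p
    (st.1 ++ r.1, r.2)) ("", cache)

def image_str_alt (image : List (List Int)) (threshold : Int) : String :=
  let st := image.foldl (fun (st : List String × PySem.Dict Int String) row =>
    let r := pvRowB row st.2
    (st.1 ++ [r.1 ++ "\n"], r.2)) ([], PySem.Dict.empty)
  String.join st.1

-- ===== PRECONDITION & SPEC =====
def Spec_image_str (image : List (List Int)) (threshold : Int) (out : String) : Prop := out = image_str_alt image threshold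
instance (image : List (List Int)) (threshold : Int) (out : String) : Decidable (Spec_image_str image threshold out) := by unfold Spec_image_str; infer_instance

-- ===== CLAIM (what is proved, stated in full; the proofs are below) =====
def Claim_equal_image_str : Prop := ∀ (image : List (List Int)) (threshold : Int), Dom_image_str image threshold → Spec_image_str image threshold (image_str image threshold)

-- ===== LEMMAS AND PROOFS =====
-- the pure value pvShadeB computes for a pixel
def pvPure (p : Int) : String :=
  if p > 205 then "██" else if p > 154 then "▓▓"
  else if p > 102 then "▒▒" else if p > 51 then "░░" else "  "

theorem pvBis_eval (p : Int) :
    pvBis p 0 4 = if p > 205 then 4 else if p > 154 then 3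
      else if p > 102 then 2 else if p > 51 then 1 else 0 := by
  split_ifs with h1 h2 h3 h4
  · simp [pvBis, pvThresholdsB, show (154:Int) < p from by omega,
      show (205:Int) < p from by omega]
  · simp [pvBis, pvThresholdsB, show (154:Int) < p from by omega,
      show ¬ (205:Int) < p from by omega]
  · simp [pvBis, pvThresholdsB, show ¬ (154:Int) < p from by omega,
      show (102:Int) < p from by omega]
  · simp [pvBis, pvThresholdsB, show ¬ (154:Int) < p from by omega,
      show ¬ (102:Int) < p from by omega, show (51:Int) < p from by omega]
  · simp [pvBis, pvThresholdsB, show ¬ (154:Int) < p from by omega,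
      show ¬ (102:Int) < p from by omega, show ¬ (51:Int) < p from by omega]

theorem pvShadeB_fst (cache : PySem.Dict Int String) (p : Int)
    (hinv : ∀ q s, cache.get? q = some s → s = pvPure q) :
    (pvShadeB cache p).1 = pvPure p := by
  unfold pvShadeB
  cases hget : cache.get? p with
  | some s => exact hinv p s hget
  | none =>
      show String.ofList _ = pvPure p
      rw [pvBis_eval]; unfold pvPure
      split_ifs <;> rfl

theorem pvShadeB_inv (cache : PySem.Dict Int String) (p : Int)
    (hinv : ∀ q s, cache.get? q = some s → s = pvPure q) :
    ∀ q s, (pvShadeB cache p).2.get? q = some s → s = pvPure q := by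
  have hfst := pvShadeB_fst cache p hinv
  unfold pvShadeB at hfst ⊢
  cases hget : cache.get? p with
  | some s => simpa [hget] using hinv
  | none =>
      simp only [hget] at hfst ⊢
      intro q s hq
      rw [PySem.Dict.get?_insert] at hq
      split_ifs at hq with hqp
      · subst hqp; cases hq; exact hfst
      · exact hinv q s hq

theorem foldl_append_str (l : List String) (s : String) :
    l.foldl (· ++ ·) s = s ++ l.foldl (· ++ ·) "" := by
  induction l generalizing s with
  | nil => simp
  | cons a l ih =>
    rw [List.foldl_cons, List.foldl_cons, ih, ih ("" ++ a)]
    simp [String.append_assoc]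

theorem join_cons (a : String) (l : List String) :
    String.join (a :: l) = a ++ String.join l := by
  simp only [String.join, List.foldl_cons]
  rw [foldl_append_str]
  simp

theorem join_append (l1 l2 : List String) :
    String.join (l1 ++ l2) = String.join l1 ++ String.join l2 := by
  induction l1 with
  | nil => simp [String.join]
  | cons a l ih =>
    rw [List.cons_append, join_cons, join_cons, ih, String.append_assoc]

theorem pvRowB_of_inv (row : List Int) (cache : PySem.Dict Int String) (acc : String)
    (hinv : ∀ q s, cache.get? q = some s → s = pvPure q) :
    (row.foldl (fun st p => let r := pvShadeB st.2 p; (st.1 ++ r.1, r.2)) (acc, cache)).1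
        = acc ++ String.join (row.map pvPure) ∧
      (∀ q s, (row.foldl (fun st p => let r := pvShadeB st.2 p; (st.1 ++ r.1, r.2))
        (acc, cache)).2.get? q = some s → s = pvPure q) := by
  induction row generalizing cache acc with
  | nil => simpa [String.join] using hinv
  | cons p row ih =>
    have hinv' := pvShadeB_inv cache p hinv
    have := ih (pvShadeB cache p).2 (acc ++ (pvShadeB cache p).1) hinv'
    rw [List.foldl_cons]
    refine ⟨?_, this.2⟩
    rw [this.1, pvShadeB_fst cache p hinv, List.map_cons, join_cons]
    simp [String.append_assoc]

theorem rowA_eq (row : List Int) (acc : String) :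
    row.foldl pvShadeA acc = acc ++ String.join (row.map pvPure) := by
  induction row generalizing acc with
  | nil => simp [String.join]
  | cons p row ih =>
    have hstep : pvShadeA acc p = acc ++ pvPure p := by
      unfold pvShadeA pvPure; split_ifs <;> rfl
    rw [List.foldl_cons, ih, hstep, List.map_cons, join_cons]
    simp [String.append_assoc]

theorem outer_eq (rows : List (List Int)) (accA : String) (accB : List String)
    (cache : PySem.Dict Int String)
    (hinv : ∀ q s, cache.get? q = some s → s = pvPure q)
    (hacc : accA = String.join accB) :
    rows.foldl (fun result row => (row.foldl pvShadeA result) ++ "\n") accA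
      = String.join (rows.foldl (fun (st : List String × PySem.Dict Int String) row =>
          let r := pvRowB row st.2
          (st.1 ++ [r.1 ++ "\n"], r.2)) (accB, cache)).1 := by
  induction rows generalizing accA accB cache with
  | nil => simpa using hacc
  | cons r rows ih =>
    obtain ⟨hv, hinv'⟩ := pvRowB_of_inv r cache "" hinv
    rw [List.foldl_cons, List.foldl_cons]
    refine ih _ _ _ hinv' ?_
    rw [rowA_eq, hacc]
    show String.join accB ++ String.join (r.map pvPure) ++ "\n"
        = String.join (accB ++ [(pvRowB r cache).1 ++ "\n"])
    unfold pvRowB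
    rw [join_append, hv, join_cons]
    simp [String.join, String.append_assoc]

-- ===== VERDICT (by name: the statement is the Claim_ definition above) =====
theorem image_str_spec : Claim_equal_image_str := by
  intro image threshold _
  unfold Spec_image_str image_str image_str_alt
  exact outer_eq image "" [] PySem.Dict.empty
    (by intro q s h; simp [PySem.Dict.get?_empty] at h) (by simp [String.join])
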